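-- pv_equiv track=rewrite | github.com/thunderscarf/chen.github.io | streamlit_app.py | bool_insure_invest
-- ===== SOURCE A (Python) =====
-- def bool_insure_invest(insure_invest_ls, insure_pdts_ls, invest_pdts_ls):
--     INSURE = False
--     INVEST = False
--     for pdt in insure_invest_ls:
--         if pdt in insure_pdts_ls:
--             INSURE = True
--         elif pdt in invest_pdts_ls:
--             INVEST = True
--     return INSURE, INVEST
-- ===== SOURCE B (Python) =====
-- def bool_insure_invest(insure_invest_ls, insure_pdts_ls, invest_pdts_ls):
--     s = set(insure_invest_ls)
--     ins = set(insure_pdts_ls)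
--     INSURE = bool(s & ins)
--     INVEST = bool((s - ins) & set(invest_pdts_ls))
--     return INSURE, INVEST
-- ===== Notes on version B (the rewrite author's own statement) =====
-- stated objective: faster
-- what changed: Replaces the element-by-element loop with flag accumulators by building sets once and computing INSURE/INVEST as emptiness tests of set intersections (subtracting the insure set first to reproduce the elif precedence).
import Mathlib
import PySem

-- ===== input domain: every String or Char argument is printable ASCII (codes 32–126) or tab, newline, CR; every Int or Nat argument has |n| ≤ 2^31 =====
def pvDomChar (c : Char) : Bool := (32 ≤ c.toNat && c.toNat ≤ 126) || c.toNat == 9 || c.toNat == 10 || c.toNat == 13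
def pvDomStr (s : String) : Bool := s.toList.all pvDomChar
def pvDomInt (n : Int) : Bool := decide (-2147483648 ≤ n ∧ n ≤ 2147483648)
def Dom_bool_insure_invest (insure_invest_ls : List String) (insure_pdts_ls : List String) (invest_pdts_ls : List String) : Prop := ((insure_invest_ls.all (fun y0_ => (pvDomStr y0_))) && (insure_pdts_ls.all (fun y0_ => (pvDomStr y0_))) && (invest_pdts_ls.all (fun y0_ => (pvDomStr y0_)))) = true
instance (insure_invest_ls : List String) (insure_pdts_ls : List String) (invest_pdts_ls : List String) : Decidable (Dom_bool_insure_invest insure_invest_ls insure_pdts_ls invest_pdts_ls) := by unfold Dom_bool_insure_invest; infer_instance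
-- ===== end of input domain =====

-- B replaces A's per-element loop with two flags by set intersection/difference emptiness tests (simpler); return value only, no mutation.

-- ===== PORT A =====
-- A: loop over insure_invest_ls keeping two Bool flags, elif gives insure priority.
def bool_insure_invest (insure_invest_ls : List String) (insure_pdts_ls : List String) (invest_pdts_ls : List String) : Bool × Bool :=
  insure_invest_ls.foldl
    (fun st pdt =>
      if insure_pdts_ls.contains pdt then (true, st.2)
      else if invest_pdts_ls.contains pdt then (st.1, true)
      else st)
    (false, false)

-- ===== PORT B =====
-- B: build sets once; INSURE = s & ins nonempty, INVEST = (s - ins) & invest nonempty.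
def bool_insure_invest_alt (insure_invest_ls : List String) (insure_pdts_ls : List String) (invest_pdts_ls : List String) : Bool × Bool :=
  let s := PySem.Set.ofList insure_invest_ls
  let ins := PySem.Set.ofList insure_pdts_ls
  let INSURE := !(PySem.Set.inter s ins).isEmpty
  let INVEST := !(PySem.Set.inter (PySem.Set.diff s ins) (PySem.Set.ofList invest_pdts_ls)).isEmpty
  (INSURE, INVEST)

-- ===== PRECONDITION & SPEC =====
def Spec_bool_insure_invest (insure_invest_ls : List String) (insure_pdts_ls : List String) (invest_pdts_ls : List String) (out : Bool × Bool) : Prop := out = bool_insure_invest_alt insure_invest_ls insure_pdts_ls invest_pdts_ls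
instance (insure_invest_ls : List String) (insure_pdts_ls : List String) (invest_pdts_ls : List String) (out : Bool × Bool) : Decidable (Spec_bool_insure_invest insure_invest_ls insure_pdts_ls invest_pdts_ls out) := by unfold Spec_bool_insure_invest; infer_instance

-- ===== CLAIM (what is proved, stated in full; the proofs are below) =====
def Claim_equal_bool_insure_invest : Prop := ∀ (insure_invest_ls : List String) (insure_pdts_ls : List String) (invest_pdts_ls : List String), Dom_bool_insure_invest insure_invest_ls insure_pdts_ls invest_pdts_ls → Spec_bool_insure_invest insure_invest_ls insure_pdts_ls invest_pdts_ls (bool_insure_invest insure_invest_ls insure_pdts_ls invest_pdts_ls)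

-- ===== LEMMAS AND PROOFS =====

-- Characterise A's loop: each flag is its initial value OR an existential over the list.
theorem loopA_char (a b c : List String) (st : Bool × Bool) :
    a.foldl
      (fun st pdt =>
        if b.contains pdt then (true, st.2)
        else if c.contains pdt then (st.1, true)
        else st) st
    = (st.1 || a.any (fun p => b.contains p),
       st.2 || a.any (fun p => !b.contains p && c.contains p)) := by
  induction a generalizing st with
  | nil => simp
  | cons x xs ih =>
    simp only [List.foldl_cons, List.any_cons]
    by_cases hb : x ∈ b
    · rw [ih]; simp [hb]
    · by_cases hc : x ∈ c
      · rw [ih]; simp [hb, hc]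
      · rw [ih]; simp [hb, hc]

theorem isEmpty_inter_ofList (a b : List String) :
    (PySem.Set.inter (PySem.Set.ofList a) (PySem.Set.ofList b)).isEmpty
      = !(a.any (fun p => b.contains p)) := by
  cases h : (PySem.Set.inter (PySem.Set.ofList a) (PySem.Set.ofList b)).isEmpty with
  | false =>
    symm
    simp only [Bool.not_eq_false']
    rw [List.isEmpty_eq_false_iff_exists_mem] at h
    obtain ⟨x, hx⟩ := h
    rw [PySem.Set.mem_inter, PySem.Set.mem_ofList, PySem.Set.mem_ofList] at hx
    exact List.any_eq_true.2 ⟨x, hx.1, by simpa using hx.2⟩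
  | true =>
    symm
    simp only [Bool.not_eq_true']
    rw [List.isEmpty_iff] at h
    rw [List.any_eq_false]
    intro x hx hc
    have hmem : x ∈ PySem.Set.inter (PySem.Set.ofList a) (PySem.Set.ofList b) := by
      rw [PySem.Set.mem_inter, PySem.Set.mem_ofList, PySem.Set.mem_ofList]
      exact ⟨hx, by simpa using hc⟩
    simp [h] at hmem

theorem isEmpty_inter_diff (a b c : List String) :
    (PySem.Set.inter (PySem.Set.diff (PySem.Set.ofList a) (PySem.Set.ofList b)) (PySem.Set.ofList c)).isEmpty
      = !(a.any (fun p => !b.contains p && c.contains p)) := by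
  cases h : (PySem.Set.inter (PySem.Set.diff (PySem.Set.ofList a) (PySem.Set.ofList b)) (PySem.Set.ofList c)).isEmpty with
  | false =>
    symm
    simp only [Bool.not_eq_false']
    rw [List.isEmpty_eq_false_iff_exists_mem] at h
    obtain ⟨x, hx⟩ := h
    rw [PySem.Set.mem_inter, PySem.Set.mem_diff, PySem.Set.mem_ofList, PySem.Set.mem_ofList, PySem.Set.mem_ofList] at hx
    refine List.any_eq_true.2 ⟨x, hx.1.1, ?_⟩
    simp only [Bool.and_eq_true, Bool.not_eq_eq_eq_not, Bool.not_true]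
    exact ⟨by simpa using hx.1.2, by simpa using hx.2⟩
  | true =>
    symm
    simp only [Bool.not_eq_true']
    rw [List.isEmpty_iff] at h
    rw [List.any_eq_false]
    intro x hx hcond
    simp only [Bool.and_eq_true, Bool.not_eq_eq_eq_not, Bool.not_true] at hcond
    have hmem : x ∈ PySem.Set.inter (PySem.Set.diff (PySem.Set.ofList a) (PySem.Set.ofList b)) (PySem.Set.ofList c) := by
      rw [PySem.Set.mem_inter, PySem.Set.mem_diff, PySem.Set.mem_ofList, PySem.Set.mem_ofList, PySem.Set.mem_ofList]
      exact ⟨⟨hx, by simpa using hcond.1⟩, by simpa using hcond.2⟩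
    simp [h] at hmem

-- ===== VERDICT (by name: the statement is the Claim_ definition above) =====
theorem bool_insure_invest_spec : Claim_equal_bool_insure_invest := by
  intro a b c _
  unfold Spec_bool_insure_invest bool_insure_invest bool_insure_invest_alt
  rw [loopA_char]
  simp only [isEmpty_inter_ofList, isEmpty_inter_diff]
  simp
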